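-- pv_equiv track=rewrite | github.com/tsuru7/algorithm-study | AtCoder/ABC276/D.py | solve
-- ===== SOURCE A (Python) =====
-- from math import gcd
--
-- def solve(n,a):
--     gcd_all = gcd(a[0], a[1])
--     for i in range(2, n):
--         gcd_all = gcd(gcd_all, a[i])
--     ans=0
--     for i in range(n):
--         tmp = a[i] // gcd_all
--         while tmp % 2 == 0:
--             tmp //= 2
--             ans += 1
--         while tmp %3 == 0:
--             tmp //= 3
--             ans += 1
--         if tmp != 1:
--             return -1
--
--     return ans
-- ===== SOURCE B (Python) =====
-- from math import gcd
--
-- def solve(n, a):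
--     g = gcd(a[0], a[1])
--     for i in range(2, n):
--         g = gcd(g, a[i])
--     p = 1
--     for i in range(n):
--         q = a[i] // g
--         if q < 1:
--             return -1
--         p *= q
--     ans = 0
--     while p % 2 == 0:
--         p //= 2
--         ans += 1
--     while p % 3 == 0:
--         p //= 3
--         ans += 1
--     return ans if p == 1 else -1
-- ===== Notes on version B (the rewrite author's own statement) =====
-- stated objective: alternative
-- what changed: B multiplies all quotients a[i]//g into one big product and strips factors of 2 and 3 from that single number at the end (a bad element survives as a leftover prime factor of the product; a non-positive quotient is rejected while multiplying), replacing A's per-element strip-and-check loop with one aggregate factorisation.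
-- outside the precondition, e.g. on solve(3, [5, 2, 0]): A returns -1, B returns -1
import Mathlib
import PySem

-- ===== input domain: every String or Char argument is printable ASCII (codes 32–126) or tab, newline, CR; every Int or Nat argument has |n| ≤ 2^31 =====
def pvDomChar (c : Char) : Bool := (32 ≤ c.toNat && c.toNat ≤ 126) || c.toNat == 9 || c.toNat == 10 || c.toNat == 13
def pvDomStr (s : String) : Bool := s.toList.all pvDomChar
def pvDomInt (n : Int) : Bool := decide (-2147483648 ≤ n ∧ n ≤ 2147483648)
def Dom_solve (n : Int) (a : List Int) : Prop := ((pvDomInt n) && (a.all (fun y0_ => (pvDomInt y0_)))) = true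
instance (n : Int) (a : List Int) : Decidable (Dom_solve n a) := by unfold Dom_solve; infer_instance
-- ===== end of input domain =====

-- B replaces A's per-element divide-strip-check loop by one aggregate step: it multiplies all
-- quotients a[i]//g into a single product and strips 2s and 3s from that one number at the end
-- (objective: alternative decomposition, not faster).

-- ===== PORT A =====

-- termination measure for the Python 'while tmp % d == 0: tmp //= d' loops (cited in decreasing_by)
theorem pvStripDec (t d : Int) (ht : t ≠ 0) (hd : 2 ≤ d) (hm : PySem.Int.mod t d = 0) :
    (PySem.Int.floordiv t d).natAbs < t.natAbs := by
  have hdvd : d ∣ t := (PySem.Int.mod_eq_zero_iff_dvd t d).mp hm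
  obtain ⟨c, rfl⟩ := hdvd
  have hc : c ≠ 0 := by rintro rfl; simp at ht
  have hfd : PySem.Int.floordiv (d * c) d = (d * c) / d :=
    PySem.Int.floordiv_eq_ediv_of_pos (by omega)
  rw [hfd, Int.mul_ediv_cancel_left c (by omega)]
  have h1 : 1 ≤ c.natAbs := by omega
  have h2 : 2 ≤ d.natAbs := by omega
  calc c.natAbs < d.natAbs * c.natAbs := by nlinarith
    _ = (d * c).natAbs := (Int.natAbs_mul d c).symm

-- 'while tmp % 2 == 0: tmp //= 2; ans += 1'  (the 't ≠ 0' conjunct only makes the loop total: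
-- Python loops forever on 0, which Pre_ excludes)
def strip2A (t ans : Int) : Int × Int :=
  if h : t ≠ 0 ∧ PySem.Int.mod t 2 = 0 then strip2A (PySem.Int.floordiv t 2) (ans + 1)
  else (t, ans)
termination_by t.natAbs
decreasing_by exact pvStripDec t 2 h.1 (by omega) h.2

-- 'while tmp % 3 == 0: tmp //= 3; ans += 1'
def strip3A (t ans : Int) : Int × Int :=
  if h : t ≠ 0 ∧ PySem.Int.mod t 3 = 0 then strip3A (PySem.Int.floordiv t 3) (ans + 1)
  else (t, ans)
termination_by t.natAbs
decreasing_by exact pvStripDec t 3 h.1 (by omega) h.2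

-- gcd_all = gcd(a[0], a[1]); for i in range(2, n): gcd_all = gcd(gcd_all, a[i])
def gcdA (n : Int) (a : List Int) : Int :=
  (PySem.List.pyRange 2 n 1).foldl
    (fun g i => (Int.gcd g (PySem.List.pyGetD a i 0) : Int))
    (Int.gcd (PySem.List.pyGetD a 0 0) (PySem.List.pyGetD a 1 0) : Int)

-- for i in range(n): tmp = a[i] // gcd_all; strip 2s; strip 3s; if tmp != 1: return -1
def loopA (a : List Int) (g : Int) : List Int → Int → Int
  | [], ans => ans
  | i :: is, ans =>
    let t := PySem.Int.floordiv (PySem.List.pyGetD a i 0) g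
    let p := strip2A t ans
    let q := strip3A p.1 p.2
    if q.1 ≠ 1 then -1 else loopA a g is q.2

def solve (n : Int) (a : List Int) : Int :=
  loopA a (gcdA n a) (PySem.List.pyRange 0 n 1) 0

-- ===== PORT B =====

-- g = gcd(a[0], a[1]); for i in range(2, n): g = gcd(g, a[i])
def gcdB (n : Int) (a : List Int) : Int :=
  (PySem.List.pyRange 2 n 1).foldl
    (fun g i => (Int.gcd g (PySem.List.pyGetD a i 0) : Int))
    (Int.gcd (PySem.List.pyGetD a 0 0) (PySem.List.pyGetD a 1 0) : Int)

-- for i in range(n): q = a[i] // g; if q < 1: return -1; p *= q   (none = 'return -1')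
def prodLoop (a : List Int) (g : Int) : List Int → Int → Option Int
  | [], p => some p
  | i :: is, p =>
    let q := PySem.Int.floordiv (PySem.List.pyGetD a i 0) g
    if q < 1 then none else prodLoop a g is (p * q)

-- 'while p % 2 == 0: p //= 2; ans += 1' (the 'x ≠ 0' conjunct only makes the loop total)
def strip2B (x c : Int) : Int × Int :=
  if h : x ≠ 0 ∧ PySem.Int.mod x 2 = 0 then strip2B (PySem.Int.floordiv x 2) (c + 1)
  else (x, c)
termination_by x.natAbs
decreasing_by exact pvStripDec x 2 h.1 (by omega) h.2

-- 'while p % 3 == 0: p //= 3; ans += 1'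
def strip3B (x c : Int) : Int × Int :=
  if h : x ≠ 0 ∧ PySem.Int.mod x 3 = 0 then strip3B (PySem.Int.floordiv x 3) (c + 1)
  else (x, c)
termination_by x.natAbs
decreasing_by exact pvStripDec x 3 h.1 (by omega) h.2

-- after the loop: 'ans' via the two while loops, then 'return ans if p == 1 else -1'
def postB (r : Option Int) : Int :=
  match r with
  | none => -1
  | some p =>
    let u := strip2B p 0
    let v := strip3B u.1 u.2
    if v.1 = 1 then v.2 else -1

def solve_alt (n : Int) (a : List Int) : Int :=
  postB (prodLoop a (gcdB n a) (PySem.List.pyRange 0 n 1) 1)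

-- ===== PRECONDITION & SPEC =====

-- Pre_ excludes inputs on which A raises (fewer than two elements, or n > len(a), or gcd 0) or
-- loops forever (a zero among a[:n] with nonzero gcd); when an earlier element already returns -1
-- before a later zero is reached A does return -1 and B agrees, so Pre_ is slightly narrower there.
def Pre_solve (n : Int) (a : List Int) : Prop :=
  2 ≤ (a.length : Int) ∧ n ≤ (a.length : Int) ∧ ∀ x ∈ a.take n.toNat, x ≠ 0
instance (n : Int) (a : List Int) : Decidable (Pre_solve n a) := by unfold Pre_solve; infer_instance

def pvWitness_solve : Int × List Int := (2, [2, 4])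

def Spec_solve (n : Int) (a : List Int) (out : Int) : Prop := out = solve_alt n a
instance (n : Int) (a : List Int) (out : Int) : Decidable (Spec_solve n a out) := by unfold Spec_solve; infer_instance

-- ===== CLAIM (what is proved, stated in full; the proofs are below) =====
def Claim_equal_solve : Prop := ∀ (n : Int) (a : List Int), Dom_solve n a → Pre_solve n a → Spec_solve n a (solve n a)

-- ===== LEMMAS AND PROOFS =====

-- x = 2^e2 * 3^e3 * r with 2 ∤ r, 3 ∤ r : the unique 2-3-adic split of a nonzero integer
def PRep (p x : Int) (k : Nat) (r : Int) : Prop := x = p ^ k * r ∧ ¬ (p ∣ r)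

def PRep23 (x : Int) (e2 e3 : Nat) (r : Int) : Prop :=
  x = 2 ^ e2 * 3 ^ e3 * r ∧ ¬ ((2:Int) ∣ r) ∧ ¬ ((3:Int) ∣ r)

theorem strip2A_rep : ∀ (t ans : Int), t ≠ 0 →
    ∃ k : Nat, PRep 2 t k (strip2A t ans).1 ∧ (strip2A t ans).2 = ans + k ∧ (strip2A t ans).1 ≠ 0 := by
  intro t ans
  induction t, ans using strip2A.induct with
  | case1 t ans h ih =>
    intro _
    obtain ⟨c, rfl⟩ := (PySem.Int.mod_eq_zero_iff_dvd t 2).mp h.2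
    have hc : c ≠ 0 := by rintro rfl; simp at h
    have hfd : PySem.Int.floordiv (2 * c) 2 = c := by
      rw [PySem.Int.floordiv_eq_ediv_of_pos (by omega)]
      exact Int.mul_ediv_cancel_left c (by omega)
    rw [hfd] at ih
    obtain ⟨k, hrep, hcnt, hne⟩ := ih hc
    rw [strip2A, dif_pos h, hfd]
    refine ⟨k + 1, ⟨?_, hrep.2⟩, ?_, hne⟩
    · conv_lhs => rw [hrep.1]
      ring
    · rw [hcnt]; push_cast; ring
  | case2 t ans h =>
    intro ht
    rw [strip2A, dif_neg h]
    refine ⟨0, ⟨by ring, ?_⟩, by simp, ht⟩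
    rw [← PySem.Int.mod_eq_zero_iff_dvd]
    tauto

theorem strip3A_rep : ∀ (t ans : Int), t ≠ 0 →
    ∃ k : Nat, PRep 3 t k (strip3A t ans).1 ∧ (strip3A t ans).2 = ans + k ∧ (strip3A t ans).1 ≠ 0 := by
  intro t ans
  induction t, ans using strip3A.induct with
  | case1 t ans h ih =>
    intro _
    obtain ⟨c, rfl⟩ := (PySem.Int.mod_eq_zero_iff_dvd t 3).mp h.2
    have hc : c ≠ 0 := by rintro rfl; simp at h
    have hfd : PySem.Int.floordiv (3 * c) 3 = c := by
      rw [PySem.Int.floordiv_eq_ediv_of_pos (by omega)]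
      exact Int.mul_ediv_cancel_left c (by omega)
    rw [hfd] at ih
    obtain ⟨k, hrep, hcnt, hne⟩ := ih hc
    rw [strip3A, dif_pos h, hfd]
    refine ⟨k + 1, ⟨?_, hrep.2⟩, ?_, hne⟩
    · conv_lhs => rw [hrep.1]
      ring
    · rw [hcnt]; push_cast; ring
  | case2 t ans h =>
    intro ht
    rw [strip3A, dif_neg h]
    refine ⟨0, ⟨by ring, ?_⟩, by simp, ht⟩
    rw [← PySem.Int.mod_eq_zero_iff_dvd]
    tauto

-- B's while loops are texturally the same loops as A's
theorem strip2B_eq : ∀ (x c : Int), strip2B x c = strip2A x c := by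
  intro x c
  induction x, c using strip2B.induct with
  | case1 x c h ih => rw [strip2B, dif_pos h, strip2A, dif_pos h, ih]
  | case2 x c h => rw [strip2B, dif_neg h, strip2A, dif_neg h]

theorem strip3B_eq : ∀ (x c : Int), strip3B x c = strip3A x c := by
  intro x c
  induction x, c using strip3B.induct with
  | case1 x c h ih => rw [strip3B, dif_pos h, strip3A, dif_pos h, ih]
  | case2 x c h => rw [strip3B, dif_neg h, strip3A, dif_neg h]

theorem rep_unique_aux {p : Int} (hp : 2 ≤ p) {k k' : Nat} {r r' : Int} (hkk : k ≤ k')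
    (heq : p ^ k * r = p ^ k' * r') (hr : ¬ p ∣ r) : k = k' ∧ r = r' := by
  obtain ⟨d, rfl⟩ := Nat.exists_eq_add_of_le hkk
  have hpk : (p : Int) ^ k ≠ 0 := by positivity
  have hr' : r = p ^ d * r' := by
    apply mul_left_cancel₀ hpk
    rw [heq, pow_add]; ring
  cases d with
  | zero => simp at hr'; omega
  | succ e =>
    exfalso
    exact hr ⟨p ^ e * r', by rw [hr', pow_succ]; ring⟩

theorem rep_unique {p x : Int} (hp : 2 ≤ p) {k k' : Nat} {r r' : Int}
    (h1 : PRep p x k r) (h2 : PRep p x k' r') : k = k' ∧ r = r' := by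
  have heq : p ^ k * r = p ^ k' * r' := h1.1.symm.trans h2.1
  rcases Nat.le_total k k' with h | h
  · exact rep_unique_aux hp h heq h1.2
  · obtain ⟨hk, hr⟩ := rep_unique_aux hp h heq.symm h2.2
    exact ⟨hk.symm, hr.symm⟩

theorem not_two_dvd_pow3_mul {b : Nat} {r : Int} (hr : ¬ (2:Int) ∣ r) : ¬ (2:Int) ∣ 3 ^ b * r := by
  intro hd
  rcases Int.prime_two.dvd_mul.mp hd with h | h
  · have := Int.prime_two.dvd_of_dvd_pow h
    omega
  · exact hr h

theorem rep23_unique {x : Int} {e2 e3 e2' e3' : Nat} {r r' : Int}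
    (h1 : PRep23 x e2 e3 r) (h2 : PRep23 x e2' e3' r') : e2 = e2' ∧ e3 = e3' ∧ r = r' := by
  have p1 : PRep 2 x e2 (3 ^ e3 * r) := ⟨by rw [h1.1]; ring, not_two_dvd_pow3_mul h1.2.1⟩
  have p2 : PRep 2 x e2' (3 ^ e3' * r') := ⟨by rw [h2.1]; ring, not_two_dvd_pow3_mul h2.2.1⟩
  obtain ⟨hk2, hy⟩ := rep_unique (by omega) p1 p2
  have q1 : PRep 3 ((3:Int) ^ e3 * r) e3 r := ⟨rfl, h1.2.2⟩
  have q2 : PRep 3 ((3:Int) ^ e3 * r) e3' r' := by rw [hy]; exact ⟨rfl, h2.2.2⟩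
  obtain ⟨hk3, hr⟩ := rep_unique (by omega) q1 q2
  exact ⟨hk2, hk3, hr⟩

-- residual and 2+3-valuation of a number via A's stripping loops, started at 0
def vresid (t : Int) : Int := (strip3A (strip2A t 0).1 (strip2A t 0).2).1
def vcnt (t : Int) : Int := (strip3A (strip2A t 0).1 (strip2A t 0).2).2

-- combined A-side stripping of a nonzero t, expressed with vresid/vcnt (accumulator shifts out)
theorem stripA_rep23 (t : Int) (ht : t ≠ 0) :
    ∃ k2 k3 : Nat,
      PRep23 t k2 k3 (vresid t) ∧ vcnt t = k2 + k3 ∧ vresid t ≠ 0 := by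
  obtain ⟨k2, hrep2, hcnt2, hne2⟩ := strip2A_rep t 0 ht
  obtain ⟨k3, hrep3, hcnt3, hne3⟩ := strip3A_rep (strip2A t 0).1 (strip2A t 0).2 hne2
  unfold vresid vcnt
  refine ⟨k2, k3, ⟨?_, ?_, hrep3.2⟩, ?_, hne3⟩
  · conv_lhs => rw [hrep2.1, hrep3.1]
    ring
  · intro hd
    exact hrep2.2 (hrep3.1 ▸ hd.mul_left ((3:Int) ^ k3))
  · rw [hcnt3, hcnt2]; ring

-- the accumulator only shifts the count; the residual is independent of it
theorem stripA_shift (t ans : Int) (ht : t ≠ 0) :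
    strip3A (strip2A t ans).1 (strip2A t ans).2 = (vresid t, ans + vcnt t) := by
  obtain ⟨k2, hrep2, hcnt2, hne2⟩ := strip2A_rep t ans ht
  obtain ⟨k3, hrep3, hcnt3, hne3⟩ := strip3A_rep (strip2A t ans).1 (strip2A t ans).2 hne2
  obtain ⟨k2', hrep2', hcnt2', hne2'⟩ := strip2A_rep t 0 ht
  obtain ⟨k3', hrep3', hcnt3', hne3'⟩ := strip3A_rep (strip2A t 0).1 (strip2A t 0).2 hne2'
  obtain ⟨hk2, hr2⟩ := rep_unique (p := 2) (by omega) hrep2 hrep2'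
  have hrep3'' : PRep 3 (strip2A t ans).1 k3' (strip3A (strip2A t 0).1 (strip2A t 0).2).1 := by
    rw [hr2]; exact hrep3'
  obtain ⟨hk3, hr3⟩ := rep_unique (p := 3) (by omega) hrep3 hrep3''
  refine Prod.ext ?_ ?_
  · show _ = vresid t
    unfold vresid; exact hr3
  · show _ = ans + vcnt t
    unfold vcnt
    rw [hcnt3, hcnt2, hcnt3', hcnt2', hk2, hk3]; ring

-- sign of the residual matches the sign of the input
theorem vresid_pos_iff (t : Int) (ht : t ≠ 0) : 0 < t ↔ 0 < vresid t := by
  obtain ⟨k2, k3, hrep, _, _⟩ := stripA_rep23 t ht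
  have hc : (0:Int) < 2 ^ k2 * 3 ^ k3 := by positivity
  have heq := hrep.1
  constructor <;> intro h <;> nlinarith

-- A's loop: if every quotient strips to residual 1 it sums the counts, otherwise it returns -1
theorem loopA_good (a : List Int) (g : Int) :
    ∀ (idxs : List Int) (ans : Int),
      (∀ i ∈ idxs, PySem.Int.floordiv (PySem.List.pyGetD a i 0) g ≠ 0) →
      (∀ i ∈ idxs, vresid (PySem.Int.floordiv (PySem.List.pyGetD a i 0) g) = 1) →
      loopA a g idxs ans
        = ans + (idxs.map (fun i => vcnt (PySem.Int.floordiv (PySem.List.pyGetD a i 0) g))).sum := by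
  intro idxs
  induction idxs with
  | nil => intro ans _ _; simp [loopA]
  | cons i is ih =>
    intro ans hnz hgood
    have hi := hnz i List.mem_cons_self
    simp only [loopA]
    rw [stripA_shift _ ans hi]
    rw [if_neg (by simpa using hgood i List.mem_cons_self)]
    rw [ih _ (fun j hj => hnz j (List.mem_cons_of_mem _ hj))
          (fun j hj => hgood j (List.mem_cons_of_mem _ hj))]
    simp [List.map_cons, List.sum_cons]
    ring

theorem loopA_bad (a : List Int) (g : Int) :
    ∀ (idxs : List Int) (ans : Int),
      (∀ i ∈ idxs, PySem.Int.floordiv (PySem.List.pyGetD a i 0) g ≠ 0) →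
      (∃ i ∈ idxs, vresid (PySem.Int.floordiv (PySem.List.pyGetD a i 0) g) ≠ 1) →
      loopA a g idxs ans = -1 := by
  intro idxs
  induction idxs with
  | nil => rintro ans _ ⟨i, hi, _⟩; exact absurd hi (List.not_mem_nil)
  | cons i is ih =>
    rintro ans hnz ⟨j, hj, hbad⟩
    have hi := hnz i List.mem_cons_self
    simp only [loopA]
    rw [stripA_shift _ ans hi]
    by_cases hres : vresid (PySem.Int.floordiv (PySem.List.pyGetD a i 0) g) = 1
    · rw [if_neg (by simpa using hres)]
      have hjis : j ∈ is := by
        rcases List.mem_cons.mp hj with rfl | h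
        · exact absurd hres hbad
        · exact h
      exact ih _ (fun k hk => hnz k (List.mem_cons_of_mem _ hk)) ⟨j, hjis, hbad⟩
    · rw [if_pos (by simpa using hres)]

-- B's product loop
theorem prodLoop_good (a : List Int) (g : Int) :
    ∀ (idxs : List Int) (p : Int),
      (∀ i ∈ idxs, 0 < PySem.Int.floordiv (PySem.List.pyGetD a i 0) g) →
      prodLoop a g idxs p
        = some (p * (idxs.map (fun i => PySem.Int.floordiv (PySem.List.pyGetD a i 0) g)).prod) := by
  intro idxs
  induction idxs with
  | nil => intro p _; simp [prodLoop]
  | cons i is ih =>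
    intro p hpos
    simp only [prodLoop]
    rw [if_neg (by have := hpos i List.mem_cons_self; omega)]
    rw [ih _ (fun j hj => hpos j (List.mem_cons_of_mem _ hj))]
    simp [List.map_cons, List.prod_cons]
    ring_nf

theorem prodLoop_bad (a : List Int) (g : Int) :
    ∀ (idxs : List Int) (p : Int),
      (∃ i ∈ idxs, PySem.Int.floordiv (PySem.List.pyGetD a i 0) g < 1) →
      prodLoop a g idxs p = none := by
  intro idxs
  induction idxs with
  | nil => rintro p ⟨i, hi, _⟩; exact absurd hi (List.not_mem_nil)
  | cons i is ih =>
    rintro p ⟨j, hj, hbad⟩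
    simp only [prodLoop]
    by_cases hq : PySem.Int.floordiv (PySem.List.pyGetD a i 0) g < 1
    · rw [if_pos hq]
    · rw [if_neg hq]
      have hjis : j ∈ is := by
        rcases List.mem_cons.mp hj with rfl | h
        · exact absurd hbad hq
        · exact h
      exact ih _ ⟨j, hjis, hbad⟩

-- multiplicativity of the 2-3-adic split
theorem rep23_mul {x y : Int} {e2 e3 f2 f3 : Nat} {r s : Int}
    (hx : PRep23 x e2 e3 r) (hy : PRep23 y f2 f3 s) :
    PRep23 (x * y) (e2 + f2) (e3 + f3) (r * s) := by
  refine ⟨by rw [hx.1, hy.1, pow_add, pow_add]; ring, ?_, ?_⟩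
  · intro hd
    rcases Int.prime_two.dvd_mul.mp hd with h | h
    · exact hx.2.1 h
    · exact hy.2.1 h
  · intro hd
    rcases Int.prime_three.dvd_mul.mp hd with h | h
    · exact hx.2.2 h
    · exact hy.2.2 h

-- split of the product of positive quotients: residuals multiply, counts add
theorem prod_rep (Q : Int → Int) :
    ∀ (idxs : List Int),
      (∀ i ∈ idxs, 0 < Q i) →
      ∃ K2 K3 : Nat,
        PRep23 ((idxs.map Q).prod) K2 K3 ((idxs.map (fun i => vresid (Q i))).prod) ∧
        ((K2:Int) + K3) = (idxs.map (fun i => vcnt (Q i))).sum := by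
  intro idxs
  induction idxs with
  | nil =>
    intro _
    exact ⟨0, 0, ⟨by norm_num, by norm_num, by norm_num⟩, by norm_num⟩
  | cons i is ih =>
    intro hpos
    obtain ⟨K2, K3, hrep, hcnt⟩ := ih (fun j hj => hpos j (List.mem_cons_of_mem _ hj))
    have hi : Q i ≠ 0 := by have := hpos i List.mem_cons_self; omega
    obtain ⟨k2, k3, hrepi, hcnti, _⟩ := stripA_rep23 (Q i) hi
    refine ⟨k2 + K2, k3 + K3, ?_, ?_⟩
    · simpa [List.map_cons, List.prod_cons] using rep23_mul hrepi hrep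
    · simp only [List.map_cons, List.sum_cons]
      rw [← hcnt, hcnti]
      push_cast; ring

-- a product of integers ≥ 1, one of them ≥ 2, is ≥ 2
theorem one_le_prod (l : List Int) (h : ∀ r ∈ l, 1 ≤ r) : 1 ≤ l.prod := by
  induction l with
  | nil => simp
  | cons x l ih =>
    have hx := h x List.mem_cons_self
    have hl := ih (fun r hr => h r (List.mem_cons_of_mem _ hr))
    rw [List.prod_cons]; nlinarith

theorem two_le_prod (l : List Int) (h : ∀ r ∈ l, 1 ≤ r) (h2 : ∃ r ∈ l, 2 ≤ r) :
    2 ≤ l.prod := by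
  induction l with
  | nil => obtain ⟨r, hr, _⟩ := h2; exact absurd hr (List.not_mem_nil)
  | cons x l ih =>
    have hx := h x List.mem_cons_self
    have hl := one_le_prod l (fun r hr => h r (List.mem_cons_of_mem _ hr))
    rw [List.prod_cons]
    obtain ⟨r, hr, hr2⟩ := h2
    rcases List.mem_cons.mp hr with rfl | hrl
    · nlinarith
    · have := ih (fun s hs => h s (List.mem_cons_of_mem _ hs)) ⟨r, hrl, hr2⟩
      nlinarith

theorem foldl_gcd_dvd (l : List Int) (g0 : Int) :
    (l.foldl (fun g x => (Int.gcd g x : Int)) g0) ∣ g0 ∧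
    ∀ x ∈ l, (l.foldl (fun g x => (Int.gcd g x : Int)) g0) ∣ x := by
  induction l generalizing g0 with
  | nil => exact ⟨dvd_refl _, by simp⟩
  | cons x l ih =>
    obtain ⟨h1, h2⟩ := ih ((Int.gcd g0 x : Int))
    refine ⟨h1.trans (Int.gcd_dvd_left _ _), ?_⟩
    intro y hy
    rcases List.mem_cons.mp hy with rfl | hy
    · exact h1.trans (Int.gcd_dvd_right _ _)
    · exact h2 y hy

theorem foldl_gcd_nonneg (l : List Int) (g0 : Int) (h : 0 ≤ g0) :
    0 ≤ l.foldl (fun g x => (Int.gcd g x : Int)) g0 := by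
  induction l generalizing g0 with
  | nil => exact h
  | cons x l ih => exact ih _ (Int.natCast_nonneg _)

-- ===== VERDICT (by name: the statement is the Claim_ definition above) =====
theorem postB_none : postB none = -1 := rfl

theorem postB_some (p : Int) :
    postB (some p) = (if (strip3B (strip2B p 0).1 (strip2B p 0).2).1 = 1
                      then (strip3B (strip2B p 0).1 (strip2B p 0).2).2 else -1) := rfl

-- ===== VERDICT (by name: the statement is the Claim_ definition above) =====
theorem solve_spec : Claim_equal_solve := by
  intro n a _ hpre
  obtain ⟨hlen2, hnlen, hnz⟩ := hpre
  show solve n a = solve_alt n a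
  by_cases hn : n ≤ 0
  · unfold solve solve_alt
    rw [PySem.List.pyRange_one_eq_nil hn]
    show (0:Int) = postB (some 1)
    rw [postB_some, strip2B_eq, strip3B_eq, strip2A, strip3A]
    norm_num [PySem.Int.mod, show Int.fmod 1 2 = 1 from by decide,
      show Int.fmod 1 3 = 1 from by decide]
  · replace hn : 0 < n := by omega
    have hgg : gcdB n a = gcdA n a := rfl
    unfold solve solve_alt
    rw [hgg]
    set g := gcdA n a with hgdef
    set Q : Int → Int := fun i => PySem.Int.floordiv (PySem.List.pyGetD a i 0) g with hQ
    -- g divides every a[i] (i < n), is nonnegative, and every a[i] (i < n) is nonzero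
    have hmap : g = ((PySem.List.pyRange 2 n 1).map (fun i => PySem.List.pyGetD a i 0)).foldl
        (fun g x => (Int.gcd g x : Int))
        ((Int.gcd (PySem.List.pyGetD a 0 0) (PySem.List.pyGetD a 1 0) : Int)) := by
      rw [hgdef, gcdA, List.foldl_map]
    obtain ⟨hinit, helem⟩ := foldl_gcd_dvd
      ((PySem.List.pyRange 2 n 1).map (fun i => PySem.List.pyGetD a i 0))
      ((Int.gcd (PySem.List.pyGetD a 0 0) (PySem.List.pyGetD a 1 0) : Int))
    have hdvd0 : g ∣ PySem.List.pyGetD a 0 0 := by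
      rw [hmap]; exact hinit.trans (Int.gcd_dvd_left _ _)
    have hdvd1 : g ∣ PySem.List.pyGetD a 1 0 := by
      rw [hmap]; exact hinit.trans (Int.gcd_dvd_right _ _)
    have hdvdi : ∀ i : Int, 0 ≤ i → i < n → g ∣ PySem.List.pyGetD a i 0 := by
      intro i h0 hi
      rcases lt_or_ge i 2 with h2 | h2
      · have : i = 0 ∨ i = 1 := by omega
        rcases this with rfl | rfl
        · exact hdvd0
        · exact hdvd1
      · rw [hmap]
        exact helem _ (List.mem_map_of_mem (PySem.List.mem_pyRange_one.mpr ⟨h2, hi⟩))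
    have hnonneg : 0 ≤ g := by
      rw [hmap]; exact foldl_gcd_nonneg _ _ (Int.natCast_nonneg _)
    have hne : ∀ i : Int, 0 ≤ i → i < n → PySem.List.pyGetD a i 0 ≠ 0 := by
      intro i h0 hi
      have hilen : i < (a.length : Int) := lt_of_lt_of_le hi hnlen
      rw [PySem.List.pyGetD_eq_getElem a (0:Int) h0 hilen]
      have hbound : i.toNat < (a.take n.toNat).length := by
        rw [List.length_take]; omega
      have hgt : (a.take n.toNat)[i.toNat] = a[i.toNat]'(by omega) :=
        List.getElem_take
      exact hgt ▸ hnz _ (List.getElem_mem hbound)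
    have hg0 : g ≠ 0 := by
      intro h0
      exact hne 0 le_rfl hn (zero_dvd_iff.mp (h0 ▸ hdvd0))
    have hgpos : 0 < g := by omega
    set idxs := PySem.List.pyRange 0 n 1 with hidxs
    have hmem : ∀ i ∈ idxs, 0 ≤ i ∧ i < n := by
      intro i hi; exact PySem.List.mem_pyRange_one.mp hi
    have hQne : ∀ i ∈ idxs, Q i ≠ 0 := by
      intro i hi
      obtain ⟨h0, hlt⟩ := hmem i hi
      have hx := hne i h0 hlt
      have hd := hdvdi i h0 hlt
      show PySem.Int.floordiv (PySem.List.pyGetD a i 0) g ≠ 0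
      rw [PySem.Int.floordiv_eq_ediv_of_pos hgpos]
      intro h0'
      have := Int.mul_ediv_cancel' hd
      rw [h0', mul_zero] at this
      exact hx this.symm
    by_cases hposall : ∀ i ∈ idxs, 0 < Q i
    · -- every quotient positive: B computes the big product
      rw [prodLoop_good a g idxs 1 hposall, postB_some]
      set P := (idxs.map Q).prod with hP
      obtain ⟨K2, K3, hrepP, hKsum⟩ := prod_rep Q idxs hposall
      have hP1 : 1 ≤ P := one_le_prod _ (by
        intro r hr
        obtain ⟨i, hi, rfl⟩ := List.mem_map.mp hr
        exact hposall i hi)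
      have hPne : (1 : Int) * P ≠ 0 := by omega
      have hres1 : ∀ i ∈ idxs, 1 ≤ vresid (Q i) := by
        intro i hi
        have := (vresid_pos_iff (Q i) (hQne i hi)).mp (hposall i hi)
        omega
      rw [strip2B_eq, strip3B_eq, stripA_shift _ 0 hPne]
      obtain ⟨K2', K3', hrepP', hcntP', _⟩ := stripA_rep23 ((1:Int) * P) hPne
      have hrepP'' : PRep23 ((1:Int)*P) K2 K3 ((idxs.map (fun i => vresid (Q i))).prod) := by
        rw [one_mul]; exact hrepP
      obtain ⟨hK2, hK3, hR⟩ := rep23_unique hrepP' hrepP''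
      by_cases hgood : ∀ i ∈ idxs, vresid (Q i) = 1
      · -- all residuals 1: both sides yield the count sum
        have hRe : vresid ((1:Int)*P) = 1 := by
          rw [hR]
          have : (idxs.map (fun i => vresid (Q i))) = idxs.map (fun _ => (1:Int)) :=
            List.map_congr_left hgood
          simp [this]
        rw [if_pos hRe]
        rw [loopA_good a g idxs 0 hQne hgood]
        rw [hcntP', hK2, hK3, hKsum]
      · -- some residual ≠ 1: both sides yield -1
        push_neg at hgood
        obtain ⟨j, hj, hjbad⟩ := hgood
        have hRbig : 2 ≤ vresid ((1:Int)*P) := by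
          rw [hR]
          apply two_le_prod
          · intro r hr
            obtain ⟨i, hi, rfl⟩ := List.mem_map.mp hr
            exact hres1 i hi
          · refine ⟨vresid (Q j), List.mem_map.mpr ⟨j, hj, rfl⟩, ?_⟩
            have := hres1 j hj
            omega
        rw [if_neg (by omega)]
        exact loopA_bad a g idxs 0 hQne ⟨j, hj, hjbad⟩
    · -- some quotient ≤ 0: A returns -1 at it, B rejects it while multiplying
      push_neg at hposall
      obtain ⟨j, hj, hjle⟩ := hposall
      have hjne := hQne j hj
      rw [prodLoop_bad a g idxs 1 ⟨j, hj, lt_of_le_of_lt hjle one_pos⟩, postB_none]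
      apply loopA_bad a g idxs 0 hQne
      refine ⟨j, hj, ?_⟩
      intro h1
      have hv : 0 < vresid (Q j) := by rw [h1]; exact one_pos
      have := (vresid_pos_iff (Q j) hjne).mpr hv
      omega
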